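-- pv_equiv track=rewrite | github.com/RepIngSE/Python-Scripts | Min_Tic/Operation_Data.py | verificar_fallas
-- ===== SOURCE A (Python) =====
-- def verificar_fallas(baldosa, k):
--     fallas_totales = 0
--     falla_detectada = 0
--
--     # Crea un diccionario vacío
--     diccionario = {}
--
--     # Recorre la lista de baldosas junto con su índice
--     for count, value in enumerate(baldosa):
--         if (value in diccionario and count - diccionario.get(value) <= k):
--
--             # Incrementa el contador de fallas detectadas
--             falla_detectada += 1
--         if (value in diccionario):
--
--             # Incrementa el contador de fallas totales
--             fallas_totales += 1
--
--         # Almacena el índice actual en el diccionario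
--         diccionario[value] = count
--
--     # Devuelve los contadores de fallas
--     return fallas_totales, falla_detectada
-- ===== SOURCE B (Python) =====
-- def verificar_fallas(baldosa, k):
--     # Group the positions of each tile value, in order of appearance.
--     posiciones = {}
--     for i, v in enumerate(baldosa):
--         posiciones.setdefault(v, []).append(i)
--
--     fallas_totales = 0
--     falla_detectada = 0
--     for pos in posiciones.values():
--         fallas_totales += len(pos) - 1
--         for prev, cur in zip(pos, pos[1:]):
--             if cur - prev <= k:
--                 falla_detectada += 1
--     return fallas_totales, falla_detectada
-- ===== Notes on version B (the rewrite author's own statement) =====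
-- stated objective: alternative
-- what changed: Replaces A's fused single pass with a last-index dict by a two-pass grouped decomposition: first build a dict from each value to the ordered list of all its indices, then sum len(positions)-1 and the count of consecutive-position gaps <= k over the groups.
import Mathlib
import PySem

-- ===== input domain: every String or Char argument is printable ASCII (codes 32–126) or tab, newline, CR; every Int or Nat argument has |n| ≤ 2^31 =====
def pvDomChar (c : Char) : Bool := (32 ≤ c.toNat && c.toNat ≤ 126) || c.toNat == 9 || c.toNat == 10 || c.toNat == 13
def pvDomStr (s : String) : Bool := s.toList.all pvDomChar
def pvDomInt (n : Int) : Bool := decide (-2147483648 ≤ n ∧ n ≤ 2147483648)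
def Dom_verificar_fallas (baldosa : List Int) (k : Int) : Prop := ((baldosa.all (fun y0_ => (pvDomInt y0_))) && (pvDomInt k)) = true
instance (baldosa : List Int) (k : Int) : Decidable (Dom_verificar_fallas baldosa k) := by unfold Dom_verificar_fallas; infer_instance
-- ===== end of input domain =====

-- B re-implements A by a grouped two-pass decomposition (per-value position lists, then a summing
-- pass over the groups) instead of A's fused single pass with a last-index dict; objective:
-- alternative structure, same linear cost.

-- ===== PORT A =====
-- one loop step of A: test the two conditions against the last-index dict, then store the index
-- (Python's `diccionario.get(value)` is only evaluated under the `value in diccionario` guard of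
-- the short-circuiting `and`, so `getD p.2 0` is exact there)
def pvStepA (k : Int) (st : Int × Int × PySem.Dict Int Int) (p : Int × Int) :
    Int × Int × PySem.Dict Int Int :=
  let fd := if st.2.2.contains p.2 && decide (p.1 - st.2.2.getD p.2 0 ≤ k) then st.2.1 + 1 else st.2.1
  let ft := if st.2.2.contains p.2 then st.1 + 1 else st.1
  (ft, fd, st.2.2.insert p.2 p.1)

def verificar_fallas (baldosa : List Int) (k : Int) : Int × Int :=
  let r := (PySem.List.enumerate baldosa 0).foldl (pvStepA k) (0, 0, PySem.Dict.empty)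
  (r.1, r.2.1)

-- ===== PORT B =====
-- first pass of B: dict mapping each value to the ordered list of its indices
-- (`posiciones.setdefault(v, []).append(i)` is `modify v [] (· ++ [i])`)
def pvGroupB (baldosa : List Int) : PySem.Dict Int (List Int) :=
  (PySem.List.enumerate baldosa 0).foldl
    (fun d p => d.modify p.2 [] (fun l => l ++ [p.1])) PySem.Dict.empty

def verificar_fallas_alt (baldosa : List Int) (k : Int) : Int × Int :=
  (pvGroupB baldosa).values.foldl
    (fun (st : Int × Int) pos =>
      (st.1 + (((pos.length : Int)) - 1),
       (pos.zip (PySem.List.slice pos (some 1) none)).foldl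
         (fun fd q => if q.2 - q.1 ≤ k then fd + 1 else fd) st.2))
    (0, 0)

-- ===== PRECONDITION & SPEC =====
def Spec_verificar_fallas (baldosa : List Int) (k : Int) (out : Int × Int) : Prop := out = verificar_fallas_alt baldosa k
instance (baldosa : List Int) (k : Int) (out : Int × Int) : Decidable (Spec_verificar_fallas baldosa k out) := by unfold Spec_verificar_fallas; infer_instance

-- ===== CLAIM (what is proved, stated in full; the proofs are below) =====
def Claim_equal_verificar_fallas : Prop := ∀ (baldosa : List Int) (k : Int), Dom_verificar_fallas baldosa k → Spec_verificar_fallas baldosa k (verificar_fallas baldosa k)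

-- ===== LEMMAS AND PROOFS =====

def pvOcc (v : Int) (xs : List Int) : List Int :=
  ((PySem.List.enumerate xs 0).filter (fun p => p.2 == v)).map (·.1)

lemma pvOcc_append (v : Int) (xs : List Int) (x : Int) :
    pvOcc v (xs ++ [x]) = pvOcc v xs ++ (if v = x then [((xs.length : Int))] else []) := by
  unfold pvOcc
  rw [PySem.List.enumerate_append, List.filter_append, List.map_append]
  congr 1
  by_cases h : v = x <;> simp [PySem.List.enumerate_cons, h, beq_iff_eq]
  intro h'; exact h h'.symm

lemma pvOcc_eq_nil_of_not_mem {x : Int} {xs : List Int} (h : x ∉ xs) : pvOcc x xs = [] := by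
  unfold pvOcc
  rw [List.map_eq_nil_iff, List.filter_eq_nil_iff]
  intro p hp
  rcases (PySem.List.mem_enumerate_iff xs 0 p).1 hp with ⟨j, hj, rfl⟩
  simp only [beq_iff_eq]
  intro he; exact h (he ▸ List.getElem_mem hj)

lemma pvOcc_ne_nil_of_mem {x : Int} {xs : List Int} (h : x ∈ xs) : pvOcc x xs ≠ [] := by
  unfold pvOcc
  rcases List.getElem_of_mem h with ⟨j, hj, rfl⟩
  simp only [ne_eq, List.map_eq_nil_iff, List.filter_eq_nil_iff]
  intro hall
  have := hall ((0 + (j:Int)), xs[j]) ((PySem.List.mem_enumerate_iff xs 0 _).2 ⟨j, hj, rfl⟩)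
  simp at this

def pvAdj (k : Int) : List Int → Int
  | [] => 0
  | [_] => 0
  | a :: b :: t => (if b - a ≤ k then 1 else 0) + pvAdj k (b :: t)

lemma pvAdj_zip_foldl (k : Int) : ∀ (l : List Int) (fd0 : Int),
    (l.zip (l.drop 1)).foldl (fun fd q => if q.2 - q.1 ≤ k then fd + 1 else fd) fd0
      = fd0 + pvAdj k l := by
  intro l
  induction l with
  | nil => intro fd0; simp [pvAdj]
  | cons a t ih =>
    intro fd0
    cases t with
    | nil => simp [pvAdj]
    | cons b t' =>
      simp only [List.drop_succ_cons, List.drop_zero, List.zip_cons_cons, List.foldl_cons]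
      rw [show (b :: t').zip t' = (b :: t').zip ((b :: t').drop 1) by simp]
      rw [ih]
      by_cases h : b - a ≤ k <;> simp [pvAdj, h] <;> ring

lemma pvAdj_append (k n : Int) : ∀ (l : List Int), l ≠ [] →
    pvAdj k (l ++ [n]) = pvAdj k l + (if n - (l.getLast?.getD 0) ≤ k then 1 else 0) := by
  intro l
  induction l with
  | nil => simp
  | cons a t ih =>
    intro _
    cases t with
    | nil => by_cases h : n - a ≤ k <;> simp [pvAdj, h]
    | cons b t' =>
      simp only [List.cons_append, pvAdj]
      rw [show (b :: t') ++ [n] = (b :: (t' ++ [n])) by simp] at *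
      have := ih (by simp)
      simp only [List.cons_append] at this
      rw [this]
      simp only [List.getLast?_cons_cons]
      ring

def pvFt (xs : List Int) : Int :=
  ((PySem.Set.ofList xs).map (fun v => ((pvOcc v xs).length : Int) - 1)).sum

def pvFd (k : Int) (xs : List Int) : Int :=
  ((PySem.Set.ofList xs).map (fun v => pvAdj k (pvOcc v xs))).sum

lemma pvSum_upd : ∀ {l : List Int}, l.Nodup → ∀ {x : Int}, x ∈ l → ∀ {f g : Int → Int},
    (∀ y ∈ l, y ≠ x → f y = g y) →
    (l.map f).sum = (l.map g).sum + (f x - g x) := by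
  intro l
  induction l with
  | nil => intro _ x hx; simp at hx
  | cons a t ih =>
    intro hnd x hx f g hfg
    rcases List.mem_cons.1 hx with rfl | hxt
    · have ht : ∀ y ∈ t, f y = g y := by
        intro y hy
        exact hfg y (List.mem_cons_of_mem _ hy) (fun hyx => (List.nodup_cons.1 hnd).1 (hyx ▸ hy))
      simp only [List.map_cons, List.sum_cons, List.map_congr_left ht]
      ring
    · have hax : a ≠ x := fun h => (List.nodup_cons.1 hnd).1 (h ▸ hxt)
      have := ih (List.nodup_cons.1 hnd).2 hxt (fun y hy hyx => hfg y (List.mem_cons_of_mem _ hy) hyx)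
      simp only [List.map_cons, List.sum_cons, this, hfg a (List.mem_cons_self) hax]
      ring

lemma pvSet_ofList_append (xs : List Int) (x : Int) :
    PySem.Set.ofList (xs ++ [x]) = if x ∈ xs then PySem.Set.ofList xs
      else PySem.Set.ofList xs ++ [x] := by
  rw [PySem.Set.ofList_eq_foldl, List.foldl_append, ← PySem.Set.ofList_eq_foldl]
  simp only [List.foldl_cons, List.foldl_nil, PySem.Set.add]
  by_cases h : x ∈ xs
  · rw [if_pos h, if_pos]
    simp [PySem.Set.contains, PySem.Set.mem_ofList, h]
  · rw [if_neg h, if_neg]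
    simp [PySem.Set.contains, PySem.Set.mem_ofList, h]

lemma pvFt_append (xs : List Int) (x : Int) :
    pvFt (xs ++ [x]) = pvFt xs + (if x ∈ xs then 1 else 0) := by
  unfold pvFt
  rw [pvSet_ofList_append]
  by_cases h : x ∈ xs <;> simp only [h, if_true, if_false]
  · have hx : x ∈ PySem.Set.ofList xs := by simp [PySem.Set.mem_ofList, h]
    rw [pvSum_upd (PySem.Set.nodup_ofList xs) hx
      (f := fun v => ((pvOcc v (xs ++ [x])).length : Int) - 1)
      (g := fun v => ((pvOcc v xs).length : Int) - 1)
      (by intro y _ hyx; simp only [pvOcc_append]; simp [hyx])]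
    rw [pvOcc_append]
    simp
  · rw [List.map_append, List.sum_append]
    have h1 : ((PySem.Set.ofList xs).map (fun v => ((pvOcc v (xs ++ [x])).length : Int) - 1))
        = ((PySem.Set.ofList xs).map (fun v => ((pvOcc v xs).length : Int) - 1)) := by
      apply List.map_congr_left
      intro y hy
      have : y ≠ x := fun he => h (he ▸ (PySem.Set.mem_ofList _ _).1 hy)
      simp only [pvOcc_append]; simp [this]
    rw [h1]
    simp only [pvOcc_append]
    simp [pvOcc_eq_nil_of_not_mem h]

lemma pvFd_append (k : Int) (xs : List Int) (x : Int) :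
    pvFd k (xs ++ [x]) = pvFd k xs
      + (if x ∈ xs ∧ (xs.length : Int) - ((pvOcc x xs).getLast?.getD 0) ≤ k then 1 else 0) := by
  unfold pvFd
  rw [pvSet_ofList_append]
  by_cases h : x ∈ xs <;> simp only [h, if_true, if_false, true_and, false_and]
  · have hx : x ∈ PySem.Set.ofList xs := by simp [PySem.Set.mem_ofList, h]
    rw [pvSum_upd (PySem.Set.nodup_ofList xs) hx
      (f := fun v => pvAdj k (pvOcc v (xs ++ [x])))
      (g := fun v => pvAdj k (pvOcc v xs))
      (by intro y _ hyx; simp only [pvOcc_append]; simp [hyx])]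
    rw [pvOcc_append]
    simp only [eq_self_iff_true, if_true]
    rw [pvAdj_append k _ _ (pvOcc_ne_nil_of_mem h)]
    ring
  · rw [List.map_append, List.sum_append]
    have h1 : ((PySem.Set.ofList xs).map (fun v => pvAdj k (pvOcc v (xs ++ [x]))))
        = ((PySem.Set.ofList xs).map (fun v => pvAdj k (pvOcc v xs))) := by
      apply List.map_congr_left
      intro y hy
      have : y ≠ x := fun he => h (he ▸ (PySem.Set.mem_ofList _ _).1 hy)
      simp only [pvOcc_append]; simp [this]
    rw [h1]
    simp only [pvOcc_append]
    simp [pvOcc_eq_nil_of_not_mem h, pvAdj]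


lemma pvA_inv (k : Int) (xs : List Int) :
    let r := (PySem.List.enumerate xs 0).foldl (pvStepA k) (0, 0, PySem.Dict.empty)
    r.1 = pvFt xs ∧ r.2.1 = pvFd k xs ∧ ∀ v, r.2.2.get? v = (pvOcc v xs).getLast? := by
  induction xs using List.reverseRecOn with
  | nil =>
    refine ⟨rfl, rfl, ?_⟩
    intro v
    simp [PySem.List.enumerate_nil, PySem.Dict.get?_empty, pvOcc]
  | append_singleton xs x ih =>
    obtain ⟨h1, h2, h3⟩ := ih
    simp only [PySem.List.enumerate_append, List.foldl_append, PySem.List.enumerate_cons,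
      PySem.List.enumerate_nil, List.foldl_cons, List.foldl_nil] at *
    set r := (PySem.List.enumerate xs 0).foldl (pvStepA k) (0, 0, PySem.Dict.empty) with hr
    have hcont : ∀ v, r.2.2.contains v = decide (v ∈ xs) := by
      intro v
      rw [PySem.Dict.contains_eq_isSome_get?, h3]
      by_cases hv : v ∈ xs
      · simp [hv, List.getLast?_isSome, pvOcc_ne_nil_of_mem hv]
      · simp [hv, pvOcc_eq_nil_of_not_mem hv]
    have hgetD : r.2.2.getD x 0 = (pvOcc x xs).getLast?.getD 0 := by
      rw [PySem.Dict.getD_eq_get?_getD, h3]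
    refine ⟨?_, ?_, ?_⟩
    · show (if r.2.2.contains x then r.1 + 1 else r.1) = _
      rw [pvFt_append, hcont, h1]
      by_cases hv : x ∈ xs <;> simp [hv]
    · show (if r.2.2.contains x && decide ((0 + (xs.length : Int)) - r.2.2.getD x 0 ≤ k)
          then r.2.1 + 1 else r.2.1) = _
      rw [pvFd_append, hcont, hgetD, h2]
      by_cases hv : x ∈ xs
      · by_cases hc : (xs.length : Int) - ((pvOcc x xs).getLast?.getD 0) ≤ k
        · rw [if_pos (by simp only [zero_add]; simp [hv, hc]), if_pos ⟨hv, hc⟩]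
        · rw [if_neg (by simp only [zero_add]; simp [hv, hc]), if_neg (by tauto)]
          ring
      · rw [if_neg (by simp [hv]), if_neg (by tauto)]
        ring
    · intro v
      show (r.2.2.insert x (0 + (xs.length : Int))).get? v = _
      rw [PySem.Dict.get?_insert, pvOcc_append]
      by_cases hv : v = x
      · simp [hv]
      · simp [hv, h3 v]



lemma pvGroupB_getD (xs : List Int) (v : Int) :
    (pvGroupB xs).getD v [] = pvOcc v xs := by
  unfold pvGroupB pvOcc
  rw [show ((PySem.List.enumerate xs 0).foldl
      (fun d p => d.modify p.2 [] (fun l => l ++ [p.1])) PySem.Dict.empty)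
    = (((PySem.List.enumerate xs 0).map (fun p => (p.2, p.1))).foldl
      (fun d p => d.modify p.1 [] (fun l => l ++ [p.2])) PySem.Dict.empty) from
    by rw [List.foldl_map]]
  rw [PySem.Dict.getD_foldl_modify_append]
  simp [List.filter_map, List.map_map, Function.comp_def]

lemma pvGroupB_keys (xs : List Int) : (pvGroupB xs).keys = PySem.Set.ofList xs := by
  unfold pvGroupB
  rw [PySem.Dict.keys_foldl_modify_key]
  simp [PySem.List.map_snd_enumerate, PySem.Dict.keys_empty]
  rfl

lemma pvGroupB_nodup (xs : List Int) : (pvGroupB xs).keys.Nodup := by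
  rw [pvGroupB_keys]; exact PySem.Set.nodup_ofList xs

lemma pvSlice_one (pos : List Int) : PySem.List.slice pos (some 1) none = pos.drop 1 := by
  have := PySem.List.slice_from_natCast (a := 1) (xs := pos)
  simpa using this

lemma pvFoldPair (f g : List Int → Int) : ∀ (vals : List (List Int)) (a b : Int),
    vals.foldl (fun (st : Int × Int) pos => (st.1 + f pos, st.2 + g pos)) (a, b)
    = (a + (vals.map f).sum, b + (vals.map g).sum) := by
  intro vals
  induction vals with
  | nil => intro a b; simp
  | cons pos t ih =>
    intro a b
    rw [List.foldl_cons, ih]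
    simp only [List.map_cons, List.sum_cons, Prod.mk.injEq]
    constructor <;> ring

lemma pvFold2 (k : Int) (vals : List (List Int)) (a b : Int) :
    vals.foldl (fun (st : Int × Int) pos =>
      (st.1 + (((pos.length : Int)) - 1),
       (pos.zip (PySem.List.slice pos (some 1) none)).foldl
         (fun fd q => if q.2 - q.1 ≤ k then fd + 1 else fd) st.2)) (a, b)
    = (a + (vals.map (fun pos => ((pos.length : Int)) - 1)).sum,
       b + (vals.map (fun pos => pvAdj k pos)).sum) := by
  have hstep : (fun (st : Int × Int) pos =>
      (st.1 + (((pos.length : Int)) - 1),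
       (pos.zip (PySem.List.slice pos (some 1) none)).foldl
         (fun fd q => if q.2 - q.1 ≤ k then fd + 1 else fd) st.2))
      = (fun (st : Int × Int) pos => (st.1 + (((pos.length : Int)) - 1), st.2 + pvAdj k pos)) := by
    funext st pos
    rw [pvSlice_one, pvAdj_zip_foldl]
  rw [hstep, pvFoldPair]

lemma pvB_eq (xs : List Int) (k : Int) :
    verificar_fallas_alt xs k = (pvFt xs, pvFd k xs) := by
  unfold verificar_fallas_alt
  rw [pvFold2]
  rw [PySem.Dict.values_eq_map_keys _ (pvGroupB_nodup xs) []]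
  simp only [List.map_map, Function.comp_def, pvGroupB_getD, pvGroupB_keys]
  unfold pvFt pvFd
  simp

-- ===== VERDICT (by name: the statement is the Claim_ definition above) =====
theorem verificar_fallas_spec : Claim_equal_verificar_fallas := by
  intro baldosa k _
  unfold Spec_verificar_fallas
  have hA := pvA_inv k baldosa
  rw [pvB_eq]
  simp only [verificar_fallas]
  exact Prod.ext hA.1 hA.2.1
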